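-- pv_equiv track=rewrite | github.com/tomhyhan/PEuler | puzzle.py | normalize_block
-- ===== SOURCE A (Python) =====
-- def normalize_block(blocks):
--     rescalers = []
--     for block in blocks:
--         min_x = float('inf')
--         min_y = float('inf')
--         max_x = -float('inf')
--         max_y = -float('inf')
--         for row, col in block:
--             min_x = min(min_x, col)
--             min_y = min(min_y, row)
--             max_x = max(max_x, col)
--             max_y = max(max_y, row)
--         rescalers.append((min_x, min_y, max_x, max_y))
--
--     new_blocks = []
--     for block, scaler in zip(blocks, rescalers):
--         min_x, min_y, max_x, max_y = scaler
--         n_row = max_y - min_y + 1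
--         n_col = max_x - min_x + 1
--         rescale_block = [(r - min_y, c - min_x) for r, c in block]
--         new_block = [[0 for _ in range(n_col)] for _ in range(n_row)]
--         for row in range(n_row):
--             for col in range(n_col):
--                 if (row,col) in rescale_block:
--                     new_block[row][col] = 1
--         new_blocks.append(new_block)
--     return new_blocks
-- ===== SOURCE B (Python) =====
-- def normalize_block(blocks):
--     out = []
--     for block in blocks:
--         min_y = min(r for r, c in block)
--         min_x = min(c for r, c in block)
--         max_y = max(r for r, c in block)
--         max_x = max(c for r, c in block)
--         grid = [[0] * (max_x - min_x + 1) for _ in range(max_y - min_y + 1)]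
--         for r, c in block:
--             grid[r - min_y][c - min_x] = 1
--         out.append(grid)
--     return out
-- ===== Notes on version B (the rewrite author's own statement) =====
-- stated objective: faster
-- what changed: B computes each block's bounding box with min()/max() and fills a zero grid by setting the block's own cells directly, replacing A's nested scan over every grid cell with an 'in' membership test against the rescaled coordinate list.
import Mathlib
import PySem

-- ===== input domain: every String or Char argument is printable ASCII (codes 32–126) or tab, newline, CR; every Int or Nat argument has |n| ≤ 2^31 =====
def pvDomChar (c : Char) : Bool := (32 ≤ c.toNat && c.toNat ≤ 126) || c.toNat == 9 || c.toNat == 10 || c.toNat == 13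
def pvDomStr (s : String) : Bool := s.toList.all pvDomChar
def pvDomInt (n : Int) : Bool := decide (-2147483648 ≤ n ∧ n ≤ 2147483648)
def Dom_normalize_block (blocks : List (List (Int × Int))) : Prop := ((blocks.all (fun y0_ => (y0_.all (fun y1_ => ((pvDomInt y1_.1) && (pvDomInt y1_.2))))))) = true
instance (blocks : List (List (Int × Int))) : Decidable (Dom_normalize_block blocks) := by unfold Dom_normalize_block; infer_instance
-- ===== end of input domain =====

-- B fills the zero grid by setting only the block's own rescaled cells instead of testing
-- membership for every grid cell; timing-checked objective: faster.


-- ===== PORT A =====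
-- A's float('inf')/-float('inf') accumulators are modelled as Option Int (none = still
-- infinite); min(inf, v) = v and min(u, v) = min u v — exact whenever the block is nonempty.
def pvAMin (o : Option Int) (v : Int) : Option Int :=
  match o with | none => some v | some u => some (min u v)
def pvAMax (o : Option Int) (v : Int) : Option Int :=
  match o with | none => some v | some u => some (max u v)

-- A's first loop over one block (state = (min_x, min_y, max_x, max_y))
def pvScaler (block : List (Int × Int)) : Option Int × Option Int × Option Int × Option Int :=
  block.foldl (fun s rc =>
    (pvAMin s.1 rc.2, pvAMin s.2.1 rc.1, pvAMax s.2.2.1 rc.2, pvAMax s.2.2.2 rc.1))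
    (none, none, none, none)

-- A's second loop over one (block, scaler) pair; for an empty block A's
-- range(float('inf') …) raises — outside Pre_, the port returns [] there.
def pvFillA (block : List (Int × Int))
    (scaler : Option Int × Option Int × Option Int × Option Int) : List (List Int) :=
  match scaler with
  | (some min_x, some min_y, some max_x, some max_y) =>
    let n_row := max_y - min_y + 1
    let n_col := max_x - min_x + 1
    let rescale_block := block.map (fun rc => (rc.1 - min_y, rc.2 - min_x))
    (List.range n_row.toNat).map (fun (row : Nat) =>
      (List.range n_col.toNat).map (fun (col : Nat) =>
        if ((row : Int), (col : Int)) ∈ rescale_block then (1 : Int) else 0))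
  | _ => []

def normalize_block (blocks : List (List (Int × Int))) : List (List (List Int)) :=
  let rescalers := blocks.map pvScaler
  (blocks.zip rescalers).map (fun bs => pvFillA bs.1 bs.2)

-- ===== PORT B =====
-- grid[i][j] = 1 (List.set is a no-op out of range; B's indices are always in range)
def pvSetCell (g : List (List Int)) (i j : Nat) : List (List Int) :=
  match g[i]? with
  | some row => g.set i (row.set j 1)
  | none => g

def pvFillB (block : List (Int × Int)) (min_y min_x max_y max_x : Int) : List (List Int) :=
  let grid := List.replicate (max_y - min_y + 1).toNat
                (List.replicate (max_x - min_x + 1).toNat (0 : Int))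
  block.foldl (fun g rc => pvSetCell g (rc.1 - min_y).toNat (rc.2 - min_x).toNat) grid

def normalize_block_alt (blocks : List (List (Int × Int))) : List (List (List Int)) :=
  blocks.map (fun block =>
    match PySem.List.min? (block.map Prod.fst) (fun x => x),
          PySem.List.min? (block.map Prod.snd) (fun x => x),
          PySem.List.max? (block.map Prod.fst) (fun x => x),
          PySem.List.max? (block.map Prod.snd) (fun x => x) with
    | some min_y, some min_x, some max_y, some max_x => pvFillB block min_y min_x max_y max_x
    | _, _, _, _ => [])  -- empty block: B's min() raises, outside Pre_

-- ===== PRECONDITION & SPEC =====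
-- Pre_ excludes inputs containing an empty block: there A raises TypeError
-- (range(float('inf'))) and B raises ValueError (min() of an empty sequence).
def Pre_normalize_block (blocks : List (List (Int × Int))) : Prop :=
  ∀ block ∈ blocks, block ≠ []
instance (blocks : List (List (Int × Int))) : Decidable (Pre_normalize_block blocks) := by
  unfold Pre_normalize_block; infer_instance

def pvWitness_normalize_block : (List (List (Int × Int))) := [[(0, 2), (1, 2), (1, 3)]]

def Spec_normalize_block (blocks : List (List (Int × Int))) (out : List (List (List Int))) : Prop := out = normalize_block_alt blocks
instance (blocks : List (List (Int × Int))) (out : List (List (List Int))) : Decidable (Spec_normalize_block blocks out) := by unfold Spec_normalize_block; infer_instance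

-- ===== CLAIM (what is proved, stated in full; the proofs are below) =====
def Claim_equal_normalize_block : Prop := ∀ (blocks : List (List (Int × Int))), Dom_normalize_block blocks → Pre_normalize_block blocks → Spec_normalize_block blocks (normalize_block blocks)

-- ===== LEMMAS AND PROOFS =====

-- cell lookup in a grid
def pvEntry (g : List (List Int)) (i j : Nat) : Option Int := (g[i]?).bind (fun row => row[j]?)

theorem pvSetCell_len (g : List (List Int)) (a b : Nat) :
    (pvSetCell g a b).length = g.length := by
  unfold pvSetCell; cases h : g[a]? <;> simp

theorem pvSetCell_entry (g : List (List Int)) (a b i j : Nat) :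
    pvEntry (pvSetCell g a b) i j =
      if a = i ∧ b = j ∧ (pvEntry g i j).isSome then some 1 else pvEntry g i j := by
  unfold pvSetCell pvEntry
  cases h : g[a]? with
  | none =>
    by_cases hai : a = i
    · subst hai; simp [h]
    · rw [if_neg (by tauto)]
  | some row =>
    obtain ⟨ha, -⟩ := List.getElem?_eq_some_iff.mp h
    by_cases hai : a = i
    · subst hai
      rw [List.getElem?_set, if_pos rfl, if_pos ha, h]
      by_cases hbj : b = j
      · subst hbj
        by_cases hjr : b < row.length
        · simp [hjr]
        · simp [hjr]
      · simp [hbj]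
    · rw [List.getElem?_set, if_neg hai, if_neg (by tauto)]

theorem pvSetCell_entry_isSome (g : List (List Int)) (a b i j : Nat) :
    (pvEntry (pvSetCell g a b) i j).isSome = (pvEntry g i j).isSome := by
  rw [pvSetCell_entry]; split_ifs with h
  · simp [h.2.2]
  · rfl

theorem pvFold_len (my mx : Int) (l : List (Int × Int)) (g : List (List Int)) :
    (l.foldl (fun g rc => pvSetCell g (rc.1 - my).toNat (rc.2 - mx).toNat) g).length
      = g.length := by
  induction l generalizing g with
  | nil => rfl
  | cons p l ih => simp [List.foldl_cons, ih, pvSetCell_len]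

theorem pvFold_entry (my mx : Int) (l : List (Int × Int)) (g : List (List Int)) (i j : Nat) :
    pvEntry (l.foldl (fun g rc => pvSetCell g (rc.1 - my).toNat (rc.2 - mx).toNat) g) i j =
      if (l.any fun rc => ((rc.1 - my).toNat == i) && ((rc.2 - mx).toNat == j))
          && (pvEntry g i j).isSome
      then some 1 else pvEntry g i j := by
  induction l generalizing g with
  | nil => simp
  | cons p l ih =>
    rw [List.foldl_cons, ih, pvSetCell_entry_isSome, pvSetCell_entry, List.any_cons]
    by_cases h1 : (p.1 - my).toNat = i <;> by_cases h2 : (p.2 - mx).toNat = j <;>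
      by_cases hs : (pvEntry g i j).isSome = true <;>
      by_cases hany : (l.any fun rc =>
        ((rc.1 - my).toNat == i) && ((rc.2 - mx).toNat == j)) = true <;>
      simp [h1, h2, hs, hany]

theorem pvGrid_ext (g₁ g₂ : List (List Int))
    (hlen : g₁.length = g₂.length)
    (hent : ∀ i j, pvEntry g₁ i j = pvEntry g₂ i j) : g₁ = g₂ := by
  apply List.ext_getElem?
  intro i
  by_cases hi : i < g₁.length
  · have hi2 : i < g₂.length := hlen ▸ hi
    rw [List.getElem?_eq_getElem hi, List.getElem?_eq_getElem hi2]
    have hrow : ∀ j : Nat, (g₁[i])[j]? = (g₂[i])[j]? := by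
      intro j
      have := hent i j
      simpa [pvEntry, List.getElem?_eq_getElem hi, List.getElem?_eq_getElem hi2] using this
    exact congrArg some (List.ext_getElem? hrow)
  · rw [List.getElem?_eq_none (by omega), List.getElem?_eq_none (by omega)]

theorem pvScaler_go (l : List (Int × Int)) (a b c d : Int) :
    (l.foldl (fun s rc =>
      (pvAMin s.1 rc.2, pvAMin s.2.1 rc.1, pvAMax s.2.2.1 rc.2, pvAMax s.2.2.2 rc.1))
      (some a, some b, some c, some d))
    = (some (l.foldl (fun x rc => min x rc.2) a),
       some (l.foldl (fun x rc => min x rc.1) b),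
       some (l.foldl (fun x rc => max x rc.2) c),
       some (l.foldl (fun x rc => max x rc.1) d)) := by
  induction l generalizing a b c d with
  | nil => rfl
  | cons p l ih =>
    rw [List.foldl_cons]
    exact ih (min a p.2) (min b p.1) (max c p.2) (max d p.1)

theorem pvReplicate_entry (R C : Nat) (v : Int) (i j : Nat) :
    pvEntry (List.replicate R (List.replicate C v)) i j =
      if i < R ∧ j < C then some v else none := by
  simp only [pvEntry, List.getElem?_replicate]
  by_cases hi : i < R <;> by_cases hj : j < C <;> simp [hi, hj]

theorem pvMapRange_entry (R C : Nat) (f : Nat → Nat → Int) (i j : Nat) :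
    pvEntry ((List.range R).map (fun row => (List.range C).map (fun col => f row col))) i j =
      if i < R ∧ j < C then some (f i j) else none := by
  simp only [pvEntry, List.getElem?_map]
  by_cases hi : i < R <;> by_cases hj : j < C <;> simp [hi, hj]

theorem pvFill_eq (block : List (Int × Int)) (my mx My Mx : Int)
    (hmy : ∀ rc ∈ block, my ≤ rc.1) (hmx : ∀ rc ∈ block, mx ≤ rc.2) :
    pvFillA block (some mx, some my, some Mx, some My) = pvFillB block my mx My Mx := by
  unfold pvFillA pvFillB
  dsimp only
  apply pvGrid_ext
  · simp [pvFold_len]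
  · intro i j
    rw [pvFold_entry, pvMapRange_entry, pvReplicate_entry]
    have key : (block.any fun rc => ((rc.1 - my).toNat == i) && ((rc.2 - mx).toNat == j)) = true ↔
        ((i : Int), (j : Int)) ∈ block.map (fun rc => (rc.1 - my, rc.2 - mx)) := by
      simp only [List.any_eq_true, List.mem_map, Bool.and_eq_true, beq_iff_eq, Prod.mk.injEq]
      constructor
      · rintro ⟨rc, hrc, e1, e2⟩
        exact ⟨rc, hrc, by have := hmy rc hrc; omega, by have := hmx rc hrc; omega⟩
      · rintro ⟨rc, hrc, e1, e2⟩
        exact ⟨rc, hrc, by omega, by omega⟩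
    by_cases hij : i < (My - my + 1).toNat ∧ j < (Mx - mx + 1).toNat
    · simp only [if_pos hij]
      by_cases ha : (block.any fun rc =>
          ((rc.1 - my).toNat == i) && ((rc.2 - mx).toNat == j)) = true
      · simp [ha, key.mp ha]
      · have hm : ¬ ((i : Int), (j : Int)) ∈ block.map (fun rc => (rc.1 - my, rc.2 - mx)) :=
          fun m => ha (key.mpr m)
        simp [ha, hm]
    · simp only [if_neg hij]
      simp

theorem per_block (block : List (Int × Int)) (h : block ≠ []) :
    pvFillA block (pvScaler block) =
    (match PySem.List.min? (block.map Prod.fst) (fun x => x),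
          PySem.List.min? (block.map Prod.snd) (fun x => x),
          PySem.List.max? (block.map Prod.fst) (fun x => x),
          PySem.List.max? (block.map Prod.snd) (fun x => x) with
    | some min_y, some min_x, some max_y, some max_x => pvFillB block min_y min_x max_y max_x
    | _, _, _, _ => []) := by
  obtain ⟨p, rest, rfl⟩ := List.exists_cons_of_ne_nil h
  have e1 : PySem.List.min? ((p :: rest).map Prod.fst) (fun x => x)
      = some ((rest.map Prod.fst).foldl min p.1) := by
    rw [List.map_cons, PySem.List.min?_id_cons]
  have e2 : PySem.List.min? ((p :: rest).map Prod.snd) (fun x => x)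
      = some ((rest.map Prod.snd).foldl min p.2) := by
    rw [List.map_cons, PySem.List.min?_id_cons]
  have e3 : PySem.List.max? ((p :: rest).map Prod.fst) (fun x => x)
      = some ((rest.map Prod.fst).foldl max p.1) := by
    rw [List.map_cons, PySem.List.max?_id_cons]
  have e4 : PySem.List.max? ((p :: rest).map Prod.snd) (fun x => x)
      = some ((rest.map Prod.snd).foldl max p.2) := by
    rw [List.map_cons, PySem.List.max?_id_cons]
  have hmy : ∀ rc ∈ (p :: rest), (rest.map Prod.fst).foldl min p.1 ≤ rc.1 := by
    intro rc hrc
    exact PySem.List.min?_isMin e1 rc.1 (List.mem_map_of_mem hrc)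
  have hmx : ∀ rc ∈ (p :: rest), (rest.map Prod.snd).foldl min p.2 ≤ rc.2 := by
    intro rc hrc
    exact PySem.List.min?_isMin e2 rc.2 (List.mem_map_of_mem hrc)
  have hscaler : pvScaler (p :: rest) =
      (some ((rest.map Prod.snd).foldl min p.2), some ((rest.map Prod.fst).foldl min p.1),
       some ((rest.map Prod.snd).foldl max p.2), some ((rest.map Prod.fst).foldl max p.1)) := by
    unfold pvScaler
    rw [List.foldl_cons]
    show List.foldl (fun s rc =>
        (pvAMin s.1 rc.2, pvAMin s.2.1 rc.1, pvAMax s.2.2.1 rc.2, pvAMax s.2.2.2 rc.1))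
        (some p.2, some p.1, some p.2, some p.1) rest = _
    rw [pvScaler_go, List.foldl_map, List.foldl_map, List.foldl_map, List.foldl_map]
  rw [e1, e2, e3, e4, hscaler]
  exact pvFill_eq (p :: rest) _ _ _ _ hmy hmx

-- ===== VERDICT (by name: the statement is the Claim_ definition above) =====
theorem normalize_block_spec : Claim_equal_normalize_block := by
  intro blocks hdom hpre
  unfold Spec_normalize_block normalize_block normalize_block_alt
  induction blocks with
  | nil => rfl
  | cons b bs ih =>
    have hb := hpre b (List.mem_cons_self ..)
    have hdbs : Dom_normalize_block bs := by
      unfold Dom_normalize_block at hdom ⊢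
      simp only [List.all_cons, Bool.and_eq_true] at hdom
      exact hdom.2
    simp only [List.map_cons, List.zip_cons_cons, List.map_cons]
    refine congrArg₂ _ (per_block b hb) ?_
    exact ih hdbs (fun x hx => hpre x (List.mem_cons_of_mem _ hx))
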